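-- pv_equiv track=rewrite | github.com/avimatt/LyricGenerator | Train.py | findMostPopPOS
-- ===== SOURCE A (Python) =====
-- def findMostPopPOS(typeWordDict, unigrams):
-- 	tagToWord = {}
-- 	for tag in typeWordDict:
-- 		for unigram in sorted(unigrams, key=unigrams.get, reverse=True):
-- 			if unigram in typeWordDict[tag]:
-- 				tagToWord[tag] = unigram
-- 				break
-- 	return tagToWord
-- ===== SOURCE B (Python) =====
-- def findMostPopPOS(typeWordDict, unigrams):
--     tagToWord = {}
--     for tag, words in typeWordDict.items():
--         ws = set(words)
--         best = None
--         for u in unigrams: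
--             if u in ws and (best is None or unigrams[best] < unigrams[u]):
--                 best = u
--         if best is not None:
--             tagToWord[tag] = best
--     return tagToWord
-- ===== Notes on version B (the rewrite author's own statement) =====
-- stated objective: faster
-- what changed: B drops the per-tag descending sort of all unigrams: for each tag it builds a set of the tag's words once and takes the most frequent matching unigram in a single linear scan with a strict-greater argmax (keeping the earliest among ties, which is exactly what A's stable reverse sort followed by first-match yields).
import Mathlib
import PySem

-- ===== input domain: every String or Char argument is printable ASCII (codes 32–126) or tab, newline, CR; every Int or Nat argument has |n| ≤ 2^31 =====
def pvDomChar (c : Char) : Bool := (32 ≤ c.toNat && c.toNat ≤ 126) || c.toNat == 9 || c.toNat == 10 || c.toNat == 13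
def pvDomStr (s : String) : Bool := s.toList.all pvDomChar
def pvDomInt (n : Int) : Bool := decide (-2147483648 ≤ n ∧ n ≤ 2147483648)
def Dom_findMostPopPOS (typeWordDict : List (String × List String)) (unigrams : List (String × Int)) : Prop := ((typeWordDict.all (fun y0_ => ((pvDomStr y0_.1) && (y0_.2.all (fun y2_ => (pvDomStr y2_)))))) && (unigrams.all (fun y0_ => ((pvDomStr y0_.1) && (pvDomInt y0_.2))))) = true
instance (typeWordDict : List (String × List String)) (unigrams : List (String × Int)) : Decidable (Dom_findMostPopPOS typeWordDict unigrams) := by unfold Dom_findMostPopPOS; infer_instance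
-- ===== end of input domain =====

-- B replaces A's per-tag stable descending sort of the unigrams by a single linear
-- argmax scan over a per-tag word set (strict '<' keeps the earliest among count-ties,
-- matching A's stable reverse sort followed by first match).

-- ===== PORT A =====
-- 'sorted(unigrams, key=unigrams.get, reverse=True)': unigrams.get is total on the very
-- keys being sorted, so 'getD w 0' is exact there; the inner for-with-break is List.find?.
def findMostPopPOS (typeWordDict : List (String × List String)) (unigrams : List (String × Int)) : List (String × String) :=
  let twd := PySem.Dict.ofList typeWordDict
  let uni := PySem.Dict.ofList unigrams
  (twd.keys.foldl (fun tagToWord tag =>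
      match (PySem.List.sorted uni.keys (fun w => uni.getD w 0) true).find?
              (fun unigram => (twd.getD tag []).contains unigram) with
      | some unigram => tagToWord.insert tag unigram
      | none => tagToWord)
    PySem.Dict.empty).items

-- ===== PORT B =====
-- Source B's inner-loop body: 'if u in ws and (best is None or unigrams[best] < unigrams[u]): best = u'
def bestStep {α : Type} (k : α → Int) (p : α → Bool) (best : Option α) (x : α) : Option α :=
  if p x && (match best with
             | none => true
             | some b => decide (k b < k x))
  then some x else best

def findMostPopPOS_alt (typeWordDict : List (String × List String)) (unigrams : List (String × Int)) : List (String × String) :=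
  let twd := PySem.Dict.ofList typeWordDict
  let uni := PySem.Dict.ofList unigrams
  (twd.items.foldl (fun tagToWord p =>
      let ws : PySem.Set String := PySem.Set.ofList p.2
      match uni.keys.foldl (bestStep (fun w => uni.getD w 0) (fun w => ws.contains w)) none with
      | some w => tagToWord.insert p.1 w
      | none => tagToWord)
    PySem.Dict.empty).items

-- ===== PRECONDITION & SPEC =====
def Spec_findMostPopPOS (typeWordDict : List (String × List String)) (unigrams : List (String × Int)) (out : List (String × String)) : Prop := out = findMostPopPOS_alt typeWordDict unigrams
instance (typeWordDict : List (String × List String)) (unigrams : List (String × Int)) (out : List (String × String)) : Decidable (Spec_findMostPopPOS typeWordDict unigrams out) := by unfold Spec_findMostPopPOS; infer_instance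

-- ===== CLAIM (what is proved, stated in full; the proofs are below) =====
def Claim_equal_findMostPopPOS : Prop := ∀ (typeWordDict : List (String × List String)) (unigrams : List (String × Int)), Dom_findMostPopPOS typeWordDict unigrams → Spec_findMostPopPOS typeWordDict unigrams (findMostPopPOS typeWordDict unigrams)

-- ===== LEMMAS AND PROOFS =====

-- find? through one stable descending insertion (the step of PySem.List.sorted · · true).
lemma find?_insertBy_rev {α : Type} (k : α → Int) (p : α → Bool) (x : α) (l : List α)
    (hl : l.Pairwise (fun a b => k b ≤ k a)) :
    (PySem.List.insertBy (fun a b => decide (k b < k a)) x l).find? p =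
      match l.find? p with
      | none => if p x then some x else none
      | some b => if p x && decide (k b < k x) then some x else some b := by
  induction l with
  | nil => simp [PySem.List.insertBy, List.find?]
  | cons y ys ih =>
    rcases List.pairwise_cons.1 hl with ⟨hy, hys⟩
    by_cases hxy : k y < k x
    · have h1 : PySem.List.insertBy (fun a b => decide (k b < k a)) x (y :: ys)
          = x :: y :: ys := by
        simp [PySem.List.insertBy, hxy]
      rw [h1, List.find?_cons (a := x)]
      cases hpx : p x with
      | true =>
        cases hF : List.find? p (y :: ys) with
        | none => simp
        | some b =>
          have hb : b ∈ y :: ys := List.mem_of_find?_eq_some hF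
          have hby : k b ≤ k y := by
            rcases List.mem_cons.1 hb with h | h
            · exact le_of_eq (by rw [h])
            · exact hy b h
          simp [lt_of_le_of_lt hby hxy]
      | false =>
        cases hF : List.find? p (y :: ys) <;> simp
    · have h1 : PySem.List.insertBy (fun a b => decide (k b < k a)) x (y :: ys)
          = y :: PySem.List.insertBy (fun a b => decide (k b < k a)) x ys := by
        simp [PySem.List.insertBy, hxy]
      rw [h1]
      simp only [List.find?_cons]
      cases hpy : p y with
      | true => simp [hxy]
      | false => exact ih hys

-- first p-match of the stable descending sort = strict-greater argmax left fold.
lemma find?_sorted_rev {α : Type} (k : α → Int) (p : α → Bool) (xs : List α) :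
    (PySem.List.sorted xs k true).find? p = xs.foldl (bestStep k p) none := by
  induction xs using List.reverseRecOn with
  | nil => simp [PySem.List.sorted]
  | append_singleton l x ih =>
    have h1 : PySem.List.sorted (l ++ [x]) k true
        = PySem.List.insertBy (fun a b => decide (k b < k a)) x (PySem.List.sorted l k true) := by
      simp [PySem.List.sorted, List.foldl_append]
    rw [h1, find?_insertBy_rev k p x _ (PySem.List.sorted_pairwise_rev l k), ih,
      List.foldl_append]
    cases hF : l.foldl (bestStep k p) none with
    | none => simp [bestStep]
    | some b => simp [bestStep]

lemma contains_setOfList (l : List String) (w : String) :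
    (PySem.Set.ofList l).contains w = l.contains w := by
  by_cases h : w ∈ l <;> simp [PySem.Set.mem_ofList, h]

-- ===== VERDICT (by name: the statement is the Claim_ definition above) =====
theorem findMostPopPOS_spec : Claim_equal_findMostPopPOS := by
  intro typeWordDict unigrams _
  unfold Spec_findMostPopPOS findMostPopPOS findMostPopPOS_alt
  dsimp only
  set twd := PySem.Dict.ofList typeWordDict with htwd
  set uni := PySem.Dict.ofList unigrams with huni
  congr 1
  have hkeys : twd.keys = twd.items.map Prod.fst := rfl
  rw [hkeys, List.foldl_map]
  apply PySem.List.foldl_congr_mem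
  intro acc q hq
  have hmem : (q.1, q.2) ∈ twd.items := by rwa [Prod.mk.eta]
  have hgetD : twd.getD q.1 [] = q.2 :=
    PySem.Dict.getD_of_mem_items twd hmem (by rw [htwd]; exact PySem.Dict.nodup_keys_ofList _) []
  rw [hgetD, find?_sorted_rev (fun w => uni.getD w 0) (fun w => (q.2).contains w) uni.keys]
  simp only [contains_setOfList]
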